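-- pv_equiv track=rewrite | github.com/stenknutsen/HomeGrownPOSTagger | PhaseFourTagging.py | to_UNK_N_that_Tagger
-- ===== SOURCE A (Python) =====
-- def to_UNK_N_that_Tagger(sent):
--     sentToReturn = []
--     skip = 0
--
--     for i in range(len(sent)):
--
--         if skip>0:
--             skip = skip -1
--             continue
--
--
--         if (i)<0 | (i+3)>=len(sent):
--             sentToReturn += [sent[i]]
--             continue
--
--         leftContext = sent[i]
--         leftTarget = sent[i+1]
--         rightTarget = sent[i+2]
--         rightContext = sent[i+3]
--
--
--         if (leftContext[0].lower()=="to")&(leftTarget[1]=="UNK")&(rightTarget[1].startswith("N"))&(rightContext[0].lower()=="that"):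
--
--             sentToReturn += [(leftContext[0],"TO")]
--             sentToReturn += [(leftTarget[0], "N")]
--             sentToReturn += [rightTarget]
--             sentToReturn += [rightContext]
--             skip = 3
--
--         else:
--             sentToReturn += [leftContext]
--
--     return sentToReturn
-- ===== SOURCE B (Python) =====
-- def to_UNK_N_that_Tagger(sent):
--     # Consume the sentence as a stack (reversed, popped from the top) with
--     # four-token destructuring; no indexing into sent, no skip counter.
--     out = []
--     stack = sent[::-1]
--     while stack:
--         if (len(stack) >= 4
--                 and stack[-1][0].lower() == "to"
--                 and stack[-2][1] == "UNK"
--                 and stack[-3][1].startswith("N")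
--                 and stack[-4][0].lower() == "that"):
--             out.append((stack.pop()[0], "TO"))
--             out.append((stack.pop()[0], "N"))
--             out.append(stack.pop())
--             out.append(stack.pop())
--         else:
--             out.append(stack.pop())
--     return out
-- ===== Notes on version B (the rewrite author's own statement) =====
-- stated objective: alternative
-- what changed: B consumes the sentence as a stack (reversed input, popped from the top) with four-token destructuring, eliminating all index arithmetic into sent and the deferred skip counter; the Lean port is structural recursion on the token list.
import Mathlib
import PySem

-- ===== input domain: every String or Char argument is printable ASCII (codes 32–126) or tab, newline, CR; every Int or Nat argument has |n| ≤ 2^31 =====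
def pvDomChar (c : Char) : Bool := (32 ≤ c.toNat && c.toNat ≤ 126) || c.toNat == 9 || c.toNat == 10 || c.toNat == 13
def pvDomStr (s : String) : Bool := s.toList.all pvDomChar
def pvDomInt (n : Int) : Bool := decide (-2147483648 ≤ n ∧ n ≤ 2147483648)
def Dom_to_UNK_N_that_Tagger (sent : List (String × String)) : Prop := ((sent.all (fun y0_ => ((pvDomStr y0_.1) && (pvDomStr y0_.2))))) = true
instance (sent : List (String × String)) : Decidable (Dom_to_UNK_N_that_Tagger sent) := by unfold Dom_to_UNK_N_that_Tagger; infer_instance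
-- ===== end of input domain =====

-- B consumes the sentence as a stack with four-token destructuring instead of A's indexed
-- for-loop with a deferred skip counter (objective: alternative; same cost).

-- ===== PORT A =====
-- A's for-loop: foldl over range(len(sent)) carrying (sentToReturn, skip).
-- Note: Python's '(i)<0 | (i+3)>=len(sent)' parses as the chained comparison
-- i < (0 | (i+3)) >= len(sent), i.e. (i < i+3) and (i+3 ≥ len(sent)); ported exactly as that.
def pvAStep (sent : List (String × String)) (st : List (String × String) × Nat) (i : Nat) :
    List (String × String) × Nat :=
  let (acc, skip) := st
  if skip > 0 then (acc, skip - 1)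
  else if i < i + 3 ∧ i + 3 ≥ sent.length then (acc ++ [sent.getD i default], skip)
  else
    let leftContext := sent.getD i default
    let leftTarget := sent.getD (i+1) default
    let rightTarget := sent.getD (i+2) default
    let rightContext := sent.getD (i+3) default
    if (PySem.Str.lower leftContext.1 == "to") && (leftTarget.2 == "UNK")
        && PySem.Str.startswith rightTarget.2 "N" && (PySem.Str.lower rightContext.1 == "that")
    then (acc ++ [(leftContext.1, "TO")] ++ [(leftTarget.1, "N")] ++ [rightTarget] ++ [rightContext], 3)
    else (acc ++ [leftContext], skip)

def to_UNK_N_that_Tagger (sent : List (String × String)) : List (String × String) :=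
  ((List.range sent.length).foldl (pvAStep sent) ([], 0)).1

-- ===== PORT B =====
-- B's loop pops tokens off the top of the reversed-input stack; the top of that stack is the
-- front of the remaining forward token list, so the port is structural recursion on that list,
-- destructuring a four-token prefix exactly as B destructures stack[-1]..stack[-4].
def pvGo : List (String × String) → List (String × String)
  | [] => []
  | lc :: lt :: rt :: rc :: rest' =>
    if (PySem.Str.lower lc.1 == "to") && (lt.2 == "UNK")
        && PySem.Str.startswith rt.2 "N" && (PySem.Str.lower rc.1 == "that")
    then (lc.1, "TO") :: (lt.1, "N") :: rt :: rc :: pvGo rest'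
    else lc :: pvGo (lt :: rt :: rc :: rest')
  | lc :: rest => lc :: pvGo rest

def to_UNK_N_that_Tagger_alt (sent : List (String × String)) : List (String × String) :=
  pvGo sent

-- ===== PRECONDITION & SPEC =====
def Spec_to_UNK_N_that_Tagger (sent : List (String × String)) (out : List (String × String)) : Prop := out = to_UNK_N_that_Tagger_alt sent
instance (sent : List (String × String)) (out : List (String × String)) : Decidable (Spec_to_UNK_N_that_Tagger sent out) := by unfold Spec_to_UNK_N_that_Tagger; infer_instance

-- ===== CLAIM (what is proved, stated in full; the proofs are below) =====
def Claim_equal_to_UNK_N_that_Tagger : Prop := ∀ (sent : List (String × String)), Dom_to_UNK_N_that_Tagger sent → Spec_to_UNK_N_that_Tagger sent (to_UNK_N_that_Tagger sent)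

-- ===== LEMMAS AND PROOFS =====

def pvCond (sent : List (String × String)) (i : Nat) : Bool :=
  (PySem.Str.lower (sent.getD i default).1 == "to") && ((sent.getD (i+1) default).2 == "UNK")
    && PySem.Str.startswith (sent.getD (i+2) default).2 "N"
    && (PySem.Str.lower (sent.getD (i+3) default).1 == "that")

-- index-based description of A's loop, used only as a proof intermediary
def pvBGo (sent : List (String × String)) (i : Nat) : List (String × String) :=
  if _h : i < sent.length then
    if _h4 : i + 3 < sent.length then
      if pvCond sent i
      then ((sent.getD i default).1, "TO") :: ((sent.getD (i+1) default).1, "N")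
            :: sent.getD (i+2) default :: sent.getD (i+3) default :: pvBGo sent (i + 4)
      else sent.getD i default :: pvBGo sent (i + 1)
    else sent.getD i default :: pvBGo sent (i + 1)
  else []
termination_by sent.length - i

theorem pvBGo_stop (sent : List (String × String)) (i : Nat) (h : ¬ i < sent.length) :
    pvBGo sent i = [] := by
  rw [pvBGo, dif_neg h]

theorem pvBGo_tail (sent : List (String × String)) (i : Nat) (h : i < sent.length)
    (h4 : ¬ i + 3 < sent.length) :
    pvBGo sent i = sent.getD i default :: pvBGo sent (i + 1) := by
  rw [pvBGo, dif_pos h, dif_neg h4]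

theorem pvBGo_match (sent : List (String × String)) (i : Nat) (h4 : i + 3 < sent.length)
    (hc : pvCond sent i = true) :
    pvBGo sent i = ((sent.getD i default).1, "TO") :: ((sent.getD (i+1) default).1, "N")
      :: sent.getD (i+2) default :: sent.getD (i+3) default :: pvBGo sent (i + 4) := by
  rw [pvBGo, dif_pos (by omega : i < sent.length), dif_pos h4, if_pos hc]

theorem pvBGo_nomatch (sent : List (String × String)) (i : Nat) (h4 : i + 3 < sent.length)
    (hc : ¬ pvCond sent i = true) :
    pvBGo sent i = sent.getD i default :: pvBGo sent (i + 1) := by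
  rw [pvBGo, dif_pos (by omega : i < sent.length), dif_pos h4, if_neg hc]

theorem pvFold_eq_go (sent : List (String × String)) :
    ∀ k i acc, i + k = sent.length →
      (List.range' i k).foldl (pvAStep sent) (acc, 0) = (acc ++ pvBGo sent i, 0) := by
  intro k
  induction k using Nat.strong_induction_on with
  | _ k ih =>
    intro i acc hik
    match k, hik with
    | 0, hik =>
      rw [pvBGo_stop sent i (by omega)]
      simp [List.range']
    | (m+1), hik =>
      have hi : i < sent.length := by omega
      rw [List.range'_succ, List.foldl_cons]
      by_cases h4 : i + 3 < sent.length
      · simp only [pvAStep, Nat.lt_irrefl, gt_iff_lt, if_false]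
        rw [if_neg (by omega : ¬ (i < i + 3 ∧ i + 3 ≥ sent.length))]
        by_cases hc : pvCond sent i = true
        · rw [if_pos (show _ = true from by simpa only [pvCond] using hc)]
          obtain ⟨m', rfl⟩ : ∃ m', m = m' + 3 := ⟨m - 3, by omega⟩
          rw [show m' + 3 = m' + 2 + 1 from rfl, List.range'_succ, List.foldl_cons,
              show m' + 2 = m' + 1 + 1 from rfl, List.range'_succ, List.foldl_cons,
              show m' + 1 = m' + 0 + 1 from rfl, List.range'_succ, List.foldl_cons]
          simp only [pvAStep, gt_iff_lt, Nat.zero_lt_succ, if_pos]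
          norm_num
          rw [ih m' (by omega) (i+1+1+1+1) _ (by omega)]
          rw [pvBGo_match sent i h4 hc]
          simp [List.append_assoc, show i+1+1+1+1 = i+4 from by omega]
        · rw [if_neg (show ¬ _ = true from by simpa only [pvCond] using hc)]
          rw [ih m (by omega) (i+1) _ (by omega)]
          rw [pvBGo_nomatch sent i h4 hc]
          simp
      · simp only [pvAStep, Nat.lt_irrefl, gt_iff_lt, if_false]
        rw [if_pos (by omega : i < i + 3 ∧ i + 3 ≥ sent.length)]
        rw [ih m (by omega) (i+1) _ (by omega)]
        rw [pvBGo_tail sent i hi h4]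
        simp

theorem pvGo_short (x : String × String) (t : List (String × String)) (h : t.length < 3) :
    pvGo (x :: t) = x :: pvGo t := by
  match t with
  | [] => simp only [pvGo]
  | [_] => simp only [pvGo]
  | [_, _] => simp only [pvGo]
  | _ :: _ :: _ :: _ => simp at h; omega

theorem pvGo_cons4 (a b c d : String × String) (t : List (String × String)) :
    pvGo (a :: b :: c :: d :: t) =
      if (PySem.Str.lower a.1 == "to") && (b.2 == "UNK")
          && PySem.Str.startswith c.2 "N" && (PySem.Str.lower d.1 == "that")
      then (a.1, "TO") :: (b.1, "N") :: c :: d :: pvGo t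
      else a :: pvGo (b :: c :: d :: t) := by simp only [pvGo]

theorem pvBGo_eq_pvGo (sent : List (String × String)) :
    ∀ k i, i + k = sent.length → pvBGo sent i = pvGo (sent.drop i) := by
  intro k
  induction k using Nat.strong_induction_on with
  | _ k ih =>
    intro i hik
    by_cases hi : i < sent.length
    · have hd0 : sent.drop i = sent[i] :: sent.drop (i+1) :=
        List.drop_eq_getElem_cons hi
      by_cases h4 : i + 3 < sent.length
      · have hd1 : sent.drop (i+1) = sent[i+1] :: sent.drop (i+2) :=
          List.drop_eq_getElem_cons (by omega)
        have hd2 : sent.drop (i+2) = sent[i+2] :: sent.drop (i+3) :=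
          List.drop_eq_getElem_cons (by omega)
        have hd3 : sent.drop (i+3) = sent[i+3] :: sent.drop (i+4) :=
          List.drop_eq_getElem_cons h4
        have hg0 : sent.getD i default = sent[i] := List.getD_eq_getElem _ _ hi
        have hg1 : sent.getD (i+1) default = sent[i+1] := List.getD_eq_getElem _ _ (by omega)
        have hg2 : sent.getD (i+2) default = sent[i+2] := List.getD_eq_getElem _ _ (by omega)
        have hg3 : sent.getD (i+3) default = sent[i+3] := List.getD_eq_getElem _ _ h4
        have hcnd : pvCond sent i =
            ((PySem.Str.lower sent[i].1 == "to") && (sent[i+1].2 == "UNK")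
              && PySem.Str.startswith sent[i+2].2 "N" && (PySem.Str.lower sent[i+3].1 == "that")) := by
          unfold pvCond; rw [hg0, hg1, hg2, hg3]
        rw [hd0, hd1, hd2, hd3, pvGo_cons4]
        by_cases hc : pvCond sent i = true
        · rw [pvBGo_match sent i h4 hc, if_pos (hcnd ▸ hc), hg0, hg1, hg2, hg3,
              ih (k - 4) (by omega) (i+4) (by omega)]
        · rw [pvBGo_nomatch sent i h4 hc, if_neg (fun hh => hc (hcnd ▸ hh)), hg0,
              ih (k - 1) (by omega) (i+1) (by omega), hd1, hd2, hd3]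
      · have hlen : (sent.drop (i+1)).length < 3 := by
          simp [List.length_drop]; omega
        rw [pvBGo_tail sent i hi h4, hd0, pvGo_short _ _ hlen,
            List.getD_eq_getElem _ _ hi, ih (k - 1) (by omega) (i+1) (by omega)]
    · rw [pvBGo_stop sent i hi, List.drop_eq_nil_of_le (by omega)]
      simp only [pvGo]

-- ===== VERDICT (by name: the statement is the Claim_ definition above) =====
theorem to_UNK_N_that_Tagger_spec : Claim_equal_to_UNK_N_that_Tagger := by
  intro sent _
  unfold Spec_to_UNK_N_that_Tagger to_UNK_N_that_Tagger to_UNK_N_that_Tagger_alt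
  rw [List.range_eq_range']
  rw [pvFold_eq_go sent sent.length 0 [] (by omega)]
  simpa using pvBGo_eq_pvGo sent sent.length 0 (by omega)
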